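-- pv_equiv track=rewrite | github.com/itsecd/isb-2026 | Lab2_20/test.py | find_max_run
-- ===== SOURCE A (Python) =====
-- def find_max_run(sequence):
--     """
--     Поиск максимальной длины подряд идущих одинаковых символов
--     Возвращает (max_zeros, max_ones)
--     """
--     if not sequence:
--         return 0, 0
--
--     max_zeros = 0
--     max_ones = 0
--     current_zero_run = 0
--     current_one_run = 0
--
--     for bit in sequence:
--         if bit == 0:
--             current_zero_run += 1
--             current_one_run = 0
--             max_zeros = max(max_zeros, current_zero_run)
--         else:  # bit == 1
--             current_one_run += 1
--             current_zero_run = 0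
--             max_ones = max(max_ones, current_one_run)
--
--     return max_zeros, max_ones
-- ===== SOURCE B (Python) =====
-- def find_max_run(sequence):
--     """
--     Run-segmentation rewrite: a two-pointer scan that jumps over each maximal
--     run of same-class bits (zero vs non-zero) at once, instead of maintaining
--     per-element running counters.
--     """
--     max_zeros = 0
--     max_ones = 0
--     i = 0
--     n = len(sequence)
--     while i < n:
--         is_zero = sequence[i] == 0
--         j = i + 1
--         while j < n and (sequence[j] == 0) == is_zero:
--             j += 1
--         if is_zero:
--             max_zeros = max(max_zeros, j - i)
--         else:
--             max_ones = max(max_ones, j - i)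
--         i = j
--     return max_zeros, max_ones
-- ===== Notes on version B (the rewrite author's own statement) =====
-- stated objective: alternative
-- what changed: Replaced the per-element four-counter loop (two running run-lengths reset on every class switch plus two maxima) by a two-pointer run-segmentation scan: the outer loop jumps over each maximal run of same-class bits at once and updates one maximum per run.
import Mathlib
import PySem

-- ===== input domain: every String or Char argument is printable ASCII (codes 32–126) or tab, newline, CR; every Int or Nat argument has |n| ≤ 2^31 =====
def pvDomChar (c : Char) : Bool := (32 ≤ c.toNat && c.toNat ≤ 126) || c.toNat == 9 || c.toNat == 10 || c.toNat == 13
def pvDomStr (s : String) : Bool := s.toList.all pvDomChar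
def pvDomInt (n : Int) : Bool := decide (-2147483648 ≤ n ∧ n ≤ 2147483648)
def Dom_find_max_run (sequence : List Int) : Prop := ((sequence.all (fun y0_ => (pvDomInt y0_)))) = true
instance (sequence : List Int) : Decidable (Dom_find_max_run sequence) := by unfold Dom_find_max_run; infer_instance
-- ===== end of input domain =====

-- B replaces A's per-element four-counter loop with a two-pointer scan over maximal
-- same-class runs (alternative decomposition, same O(n) cost).


-- ===== PORT A =====
-- one step of A's for-loop; state = ((max_zeros, max_ones), (current_zero_run, current_one_run))
def findMaxRunStepA (st : (Int × Int) × (Int × Int)) (bit : Int) : (Int × Int) × (Int × Int) :=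
  let mz := st.1.1; let mo := st.1.2; let cz := st.2.1; let co := st.2.2
  if bit = 0 then ((max mz (cz + 1), mo), (cz + 1, 0))
  else ((mz, max mo (co + 1)), (0, co + 1))

def find_max_run (sequence : List Int) : Int × Int :=
  if sequence = [] then (0, 0)
  else (sequence.foldl findMaxRunStepA ((0, 0), (0, 0))).1

-- ===== PORT B =====
-- B's outer while-loop: consume one maximal run of same-class bits per iteration
def findMaxRunGoB (seq : List Int) (mz mo : Int) : Int × Int :=
  match seq with
  | [] => (mz, mo)
  | x :: xs =>
    let isZero : Bool := x == 0
    let run := (x :: xs).takeWhile (fun b => (b == 0) == isZero)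
    let rest := (x :: xs).dropWhile (fun b => (b == 0) == isZero)
    if isZero then findMaxRunGoB rest (max mz (run.length : Int)) mo
    else findMaxRunGoB rest mz (max mo (run.length : Int))
termination_by seq.length
decreasing_by
  all_goals
    simp only [List.dropWhile_cons, beq_self_eq_true, if_pos, List.length_cons]
    exact Nat.lt_succ_of_le (List.length_dropWhile_le _ _)

def find_max_run_alt (sequence : List Int) : Int × Int := findMaxRunGoB sequence 0 0

-- ===== PRECONDITION & SPEC =====
def Spec_find_max_run (sequence : List Int) (out : Int × Int) : Prop := out = find_max_run_alt sequence
instance (sequence : List Int) (out : Int × Int) : Decidable (Spec_find_max_run sequence out) := by unfold Spec_find_max_run; infer_instance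

-- ===== CLAIM (what is proved, stated in full; the proofs are below) =====
def Claim_equal_find_max_run : Prop := ∀ (sequence : List Int), Dom_find_max_run sequence → Spec_find_max_run sequence (find_max_run sequence)

-- ===== LEMMAS AND PROOFS =====

-- A's loop across a nonempty run of zeros
theorem foldl_stepA_zeros (run : List Int) (hne : run ≠ []) (hz : ∀ b ∈ run, b = 0)
    (mz mo cz co : Int) :
    run.foldl findMaxRunStepA ((mz, mo), (cz, co)) =
      ((max mz (cz + run.length), mo), (cz + run.length, 0)) := by
  induction run generalizing mz cz co with
  | nil => exact absurd rfl hne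
  | cons b rest ih =>
    have hb : b = 0 := hz b (by simp)
    subst hb
    have hstep : findMaxRunStepA ((mz, mo), (cz, co)) 0 = ((max mz (cz + 1), mo), (cz + 1, 0)) := by
      simp [findMaxRunStepA]
    rw [List.foldl_cons, hstep]
    cases rest with
    | nil => simp
    | cons c cs =>
      rw [ih (by simp) (fun x hx => hz x (by simp [hx]))]
      simp only [List.length_cons, Prod.mk.injEq]
      refine ⟨⟨?_, ?_⟩, ?_, ?_⟩ <;> push_cast <;> omega

-- A's loop across a nonempty run of non-zeros
theorem foldl_stepA_ones (run : List Int) (hne : run ≠ []) (hz : ∀ b ∈ run, b ≠ 0)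
    (mz mo cz co : Int) :
    run.foldl findMaxRunStepA ((mz, mo), (cz, co)) =
      ((mz, max mo (co + run.length)), (0, co + run.length)) := by
  induction run generalizing mo cz co with
  | nil => exact absurd rfl hne
  | cons b rest ih =>
    have hb : b ≠ 0 := hz b (by simp)
    have hstep : findMaxRunStepA ((mz, mo), (cz, co)) b = ((mz, max mo (co + 1)), (0, co + 1)) := by
      simp [findMaxRunStepA, hb]
    rw [List.foldl_cons, hstep]
    cases rest with
    | nil => simp
    | cons c cs =>
      rw [ih (by simp) (fun x hx => hz x (by simp [hx]))]
      simp only [List.length_cons, Prod.mk.injEq]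
      refine ⟨⟨?_, ?_⟩, ?_, ?_⟩ <;> push_cast <;> omega

-- main invariant: A's fold from a state whose current counter for the head's class is 0
-- computes B's run-segmentation result
theorem foldl_stepA_eq_goB (n : ℕ) (xs : List Int) (hlen : xs.length ≤ n)
    (mz mo cz co : Int)
    (hhead : ∀ x, xs.head? = some x → (x = 0 → cz = 0) ∧ (x ≠ 0 → co = 0)) :
    (xs.foldl findMaxRunStepA ((mz, mo), (cz, co))).1 = findMaxRunGoB xs mz mo := by
  induction n generalizing xs mz mo cz co with
  | zero =>
    have : xs = [] := List.length_eq_zero_iff.mp (Nat.le_zero.mp hlen)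
    subst this; simp [findMaxRunGoB]
  | succ n ih =>
    cases xs with
    | nil => simp [findMaxRunGoB]
    | cons x xs =>
      simp only [List.length_cons] at hlen
      by_cases hx : x = 0
      · -- head is zero: run of zeros
        have hk : (x == 0) = true := by simp [hx]
        set p : Int → Bool := fun b => (b == 0) == (x == 0) with hp
        have hdec := List.takeWhile_append_dropWhile (p := p) (l := x :: xs)
        have hrun_ne : (x :: xs).takeWhile p ≠ [] := by
          simp [hp, hk]
        have hrun_z : ∀ b ∈ (x :: xs).takeWhile p, b = 0 := by
          intro b hb
          have := List.mem_takeWhile_imp hb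
          simpa [hp, hk] using this
        have hcz : cz = 0 := ((hhead x rfl).1) hx
        have hrest_head : ∀ y, ((x :: xs).dropWhile p).head? = some y → y ≠ 0 := by
          intro y hy
          have hpy : ¬ p y = true := by
            have := List.head?_dropWhile_not p (x :: xs)
            rw [hy] at this
            simpa using this
          simpa [hp, hk] using hpy
        have h1 : ((x :: xs).takeWhile p).length + ((x :: xs).dropWhile p).length
            = xs.length + 1 := by
          have := congrArg List.length hdec
          rw [List.length_append] at this
          simpa using this
        have h2 : 1 ≤ ((x :: xs).takeWhile p).length :=
          Nat.one_le_iff_ne_zero.mpr (by simpa using hrun_ne)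
        have hlt : ((x :: xs).dropWhile p).length ≤ n := by omega
        conv_lhs => rw [← hdec]
        rw [List.foldl_append,
          foldl_stepA_zeros _ hrun_ne hrun_z mz mo cz co, hcz,
          ih _ hlt _ _ _ _ (by
            intro y hy
            exact ⟨fun h0 => absurd h0 (hrest_head y hy), fun _ => rfl⟩)]
        rw [findMaxRunGoB]
        simp [hp, hk]
      · -- head is non-zero: run of non-zeros
        have hk : (x == 0) = false := by simp [hx]
        set p : Int → Bool := fun b => (b == 0) == (x == 0) with hp
        have hdec := List.takeWhile_append_dropWhile (p := p) (l := x :: xs)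
        have hrun_ne : (x :: xs).takeWhile p ≠ [] := by
          simp [hp, hk]
        have hrun_z : ∀ b ∈ (x :: xs).takeWhile p, b ≠ 0 := by
          intro b hb
          have := List.mem_takeWhile_imp hb
          simpa [hp, hk] using this
        have hco : co = 0 := ((hhead x rfl).2) hx
        have hrest_head : ∀ y, ((x :: xs).dropWhile p).head? = some y → y = 0 := by
          intro y hy
          have hpy : ¬ p y = true := by
            have := List.head?_dropWhile_not p (x :: xs)
            rw [hy] at this
            simpa using this
          simpa [hp, hk] using hpy
        have h1 : ((x :: xs).takeWhile p).length + ((x :: xs).dropWhile p).length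
            = xs.length + 1 := by
          have := congrArg List.length hdec
          rw [List.length_append] at this
          simpa using this
        have h2 : 1 ≤ ((x :: xs).takeWhile p).length :=
          Nat.one_le_iff_ne_zero.mpr (by simpa using hrun_ne)
        have hlt : ((x :: xs).dropWhile p).length ≤ n := by omega
        conv_lhs => rw [← hdec]
        rw [List.foldl_append,
          foldl_stepA_ones _ hrun_ne hrun_z mz mo cz co, hco,
          ih _ hlt _ _ _ _ (by
            intro y hy
            exact ⟨fun _ => rfl, fun h0 => absurd (hrest_head y hy) h0⟩)]
        rw [findMaxRunGoB]
        simp [hp, hk]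

-- ===== VERDICT (by name: the statement is the Claim_ definition above) =====
theorem find_max_run_spec : Claim_equal_find_max_run := by
  intro sequence _
  unfold Spec_find_max_run find_max_run find_max_run_alt
  split
  · next h => subst h; rw [findMaxRunGoB]
  · exact foldl_stepA_eq_goB sequence.length sequence le_rfl 0 0 0 0
      (fun x _ => ⟨fun _ => rfl, fun _ => rfl⟩)
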